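-- pv_equiv track=rewrite | github.com/JhowPaul/PythonLearning | python Basics parte 1/ex149.py | impar
-- ===== SOURCE A (Python) =====
-- def impar(x):
--     for i in range(len(x)):
--         for j in range(len(x)):
--             if i!=j:
--                 produto=x[i]*x[j]
--                 if produto &1:
--                     return True
--     return False
-- ===== SOURCE B (Python) =====
-- def impar(x):
--     # Single pass: the product of two distinct elements is odd iff
--     # the list contains at least two odd elements.
--     odds = 0
--     for v in x:
--         if v % 2:
--             odds += 1
--             if odds == 2:
--                 return True
--     return False
-- ===== Notes on version B (the rewrite author's own statement) =====
-- stated objective: simpler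
-- what changed: Replaced the nested index scan over all ordered pairs by a single pass that counts odd elements and returns True as soon as two are found.
import Mathlib
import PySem

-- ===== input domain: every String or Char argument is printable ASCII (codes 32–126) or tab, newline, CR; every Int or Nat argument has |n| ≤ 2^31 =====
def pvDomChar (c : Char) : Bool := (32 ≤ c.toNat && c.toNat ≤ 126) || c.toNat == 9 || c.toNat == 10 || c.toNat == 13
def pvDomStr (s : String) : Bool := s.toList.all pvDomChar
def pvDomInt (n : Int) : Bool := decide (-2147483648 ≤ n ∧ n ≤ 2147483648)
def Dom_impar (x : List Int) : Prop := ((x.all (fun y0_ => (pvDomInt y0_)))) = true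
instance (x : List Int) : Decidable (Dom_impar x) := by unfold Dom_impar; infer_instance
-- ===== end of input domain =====

-- B replaces A's nested scan over all ordered index pairs by a single pass
-- counting odd elements (two distinct elements have an odd product iff the
-- list contains at least two odd elements); objective: simpler.


-- ===== PORT A =====
-- Literal port: the two for-loops with early `return True` are the nested
-- `any` over `List.range (len x)`; x[i] with 0 ≤ i < len x never raises, so
-- `x.getD i 0` is exact; `produto & 1` (truthiness) is `PySem.Int.band produto 1 ≠ 0`.
def impar (x : List Int) : Bool :=
  (List.range x.length).any (fun i =>
    (List.range x.length).any (fun j =>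
      decide (i ≠ j) &&
        (let produto := x.getD i 0 * x.getD j 0
         PySem.Int.band produto 1 != 0)))

-- ===== PORT B =====
-- One pass with an odd-counter and early exit, following Source B.
def imparAltGo : List Int → Nat → Bool
  | [], _ => false
  | v :: t, odds =>
      if PySem.Int.mod v 2 ≠ 0 then
        if odds + 1 == 2 then true else imparAltGo t (odds + 1)
      else imparAltGo t odds

def impar_alt (x : List Int) : Bool := imparAltGo x 0

-- ===== PRECONDITION & SPEC =====
def Spec_impar (x : List Int) (out : Bool) : Prop := out = impar_alt x
instance (x : List Int) (out : Bool) : Decidable (Spec_impar x out) := by unfold Spec_impar; infer_instance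

-- ===== CLAIM (what is proved, stated in full; the proofs are below) =====
def Claim_equal_impar : Prop := ∀ (x : List Int), Dom_impar x → Spec_impar x (impar x)

-- ===== LEMMAS AND PROOFS =====

-- An int is "odd" for both programs when its Python mod 2 is nonzero.
def pvOdd (v : Int) : Bool := PySem.Int.mod v 2 != 0

lemma band_one_ne_zero (a : Int) : (PySem.Int.band a 1 != 0) = pvOdd a := by
  simp [pvOdd, PySem.Int.band_one]

lemma odd_mul (a b : Int) : pvOdd (a * b) = (pvOdd a && pvOdd b) := by
  have ha2 : PySem.Int.mod a 2 = a % 2 := PySem.Int.mod_eq_emod_of_pos (by norm_num)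
  have hb2 : PySem.Int.mod b 2 = b % 2 := PySem.Int.mod_eq_emod_of_pos (by norm_num)
  have hm2 : PySem.Int.mod (a * b) 2 = (a * b) % 2 :=
    PySem.Int.mod_eq_emod_of_pos (by norm_num)
  have hmul : (a * b) % 2 = (a % 2) * (b % 2) % 2 := Int.mul_emod a b 2
  simp only [pvOdd, ha2, hb2, hm2]
  rcases Int.emod_two_eq a with h | h <;> rcases Int.emod_two_eq b with h' | h' <;>
    simp [hmul, h, h']

lemma countP_pos_iff (p : Int → Bool) (t : List Int) :
    1 ≤ t.countP p ↔ ∃ k, k < t.length ∧ p (t.getD k 0) = true := by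
  rw [show (1 ≤ t.countP p) ↔ 0 < t.countP p from Iff.rfl, List.countP_pos_iff]
  constructor
  · rintro ⟨a, ha, hpa⟩
    obtain ⟨k, hk, rfl⟩ := List.mem_iff_getElem.mp ha
    exact ⟨k, hk, by rwa [List.getD_eq_getElem t 0 hk]⟩
  · rintro ⟨k, hk, hp⟩
    exact ⟨t.getD k 0, by rw [List.getD_eq_getElem t 0 hk]; exact t.getElem_mem hk, hp⟩

-- Two distinct positions holding odd values ↔ at least two odd elements.
lemma two_distinct_iff (x : List Int) :
    (∃ i j, i < x.length ∧ j < x.length ∧ i ≠ j ∧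
        pvOdd (x.getD i 0) = true ∧ pvOdd (x.getD j 0) = true)
      ↔ 2 ≤ x.countP pvOdd := by
  induction x with
  | nil => simp
  | cons v t ih =>
    by_cases hv : pvOdd v = true
    · rw [List.countP_cons_of_pos hv]
      constructor
      · rintro ⟨i, j, hi, hj, hij, hpi, hpj⟩
        -- at least one of i, j is positive; it gives an odd element of t
        have : ∃ k, k < t.length ∧ pvOdd (t.getD k 0) = true := by
          rcases i with _ | i
          · rcases j with _ | j
            · omega
            · exact ⟨j, by simpa using hj, by simpa using hpj⟩
          · exact ⟨i, by simpa using hi, by simpa using hpi⟩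
        have := (countP_pos_iff pvOdd t).mpr this
        omega
      · intro h
        have h1 : 1 ≤ t.countP pvOdd := by omega
        obtain ⟨k, hk, hpk⟩ := (countP_pos_iff pvOdd t).mp h1
        exact ⟨0, k + 1, by simp, by simpa using hk, by omega, by simpa using hv,
               by simpa using hpk⟩
    · rw [List.countP_cons_of_neg (by simpa using hv)]
      rw [← ih]
      constructor
      · rintro ⟨i, j, hi, hj, hij, hpi, hpj⟩
        rcases i with _ | i
        · exact absurd (by simpa using hpi) hv
        rcases j with _ | j
        · exact absurd (by simpa using hpj) hv
        exact ⟨i, j, by simpa using hi, by simpa using hj, by omega,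
               by simpa using hpi, by simpa using hpj⟩
      · rintro ⟨i, j, hi, hj, hij, hpi, hpj⟩
        exact ⟨i + 1, j + 1, by simpa using hi, by simpa using hj, by omega,
               by simpa using hpi, by simpa using hpj⟩

lemma impar_true_iff (x : List Int) :
    impar x = true ↔ 2 ≤ x.countP pvOdd := by
  rw [← two_distinct_iff]
  simp only [impar, band_one_ne_zero, odd_mul, List.any_eq_true, List.mem_range,
    Bool.and_eq_true, decide_eq_true_iff]
  constructor
  · rintro ⟨i, hi, j, hj, hij, hpi, hpj⟩
    exact ⟨i, j, hi, hj, hij, hpi, hpj⟩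
  · rintro ⟨i, j, hi, hj, hij, hpi, hpj⟩
    exact ⟨i, hi, j, hj, hij, hpi, hpj⟩

lemma imparAltGo_eq (x : List Int) :
    ∀ odds, odds < 2 → imparAltGo x odds = decide (2 ≤ odds + x.countP pvOdd) := by
  induction x with
  | nil => intro odds h; simp [imparAltGo]; omega
  | cons v t ih =>
    intro odds h
    by_cases hv : pvOdd v = true
    · have hv' : PySem.Int.mod v 2 ≠ 0 := by simpa [pvOdd] using hv
      rw [List.countP_cons_of_pos hv]
      simp only [imparAltGo, if_pos hv']
      by_cases h2 : odds + 1 = 2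
      · simp [h2]; omega
      · rw [if_neg (by simpa using h2), ih (odds + 1) (by omega)]
        simp only [decide_eq_decide]
        omega
    · have hv' : ¬ PySem.Int.mod v 2 ≠ 0 := by simpa [pvOdd] using hv
      rw [List.countP_cons_of_neg (by simpa using hv)]
      simp only [imparAltGo, if_neg hv']
      exact ih odds h

-- ===== VERDICT (by name: the statement is the Claim_ definition above) =====
theorem impar_spec : Claim_equal_impar := by
  intro x _
  unfold Spec_impar impar_alt
  rw [imparAltGo_eq x 0 (by omega), Nat.zero_add]
  by_cases h : 2 ≤ x.countP pvOdd
  · rw [(impar_true_iff x).mpr h, decide_eq_true h]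
  · rw [decide_eq_false h, Bool.eq_false_iff]
    exact fun hc => h ((impar_true_iff x).mp hc)
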